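-- pv_equiv track=rewrite | github.com/Naor-Daniel/scamurai-backend | main.py | domainIsListed
-- ===== SOURCE A (Python) =====
-- from typing import Any, Dict, List, Tuple
--
-- def normalizeDomain(value: str) -> str:
--     return str(value or "").strip().lower()
--
-- def domainIsListed(domain: str, listed: List[str]) -> bool:
--     d = normalizeDomain(domain)
--     if not d:
--         return False
--     for item in listed:
--         item = normalizeDomain(item)
--         if not item:
--             continue
--         if d == item or d.endswith("." + item):
--             return True
--     return False
-- ===== SOURCE B (Python) =====
-- def normalizeDomain(value: str) -> str:
--     return str(value or "").strip().lower()
--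
-- def domainIsListed(domain, listed):
--     # Build a set of normalized listed entries once, then test d and each
--     # dot-suffix of d with set lookups instead of scanning listed per pattern.
--     s = set()
--     for x in listed:
--         n = normalizeDomain(x)
--         if n:
--             s.add(n)
--     d = normalizeDomain(domain)
--     if not d:
--         return False
--     if d in s:
--         return True
--     for i, ch in enumerate(d):
--         if ch == '.' and d[i+1:] in s:
--             return True
--     return False
-- ===== Notes on version B (the rewrite author's own statement) =====
-- stated objective: alternative
-- what changed: B builds a set of normalized listed entries once and then checks the domain and each of its dot-suffixes by set lookup, instead of A's scan over listed doing an equality and an endswith test per entry.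
import Mathlib
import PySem

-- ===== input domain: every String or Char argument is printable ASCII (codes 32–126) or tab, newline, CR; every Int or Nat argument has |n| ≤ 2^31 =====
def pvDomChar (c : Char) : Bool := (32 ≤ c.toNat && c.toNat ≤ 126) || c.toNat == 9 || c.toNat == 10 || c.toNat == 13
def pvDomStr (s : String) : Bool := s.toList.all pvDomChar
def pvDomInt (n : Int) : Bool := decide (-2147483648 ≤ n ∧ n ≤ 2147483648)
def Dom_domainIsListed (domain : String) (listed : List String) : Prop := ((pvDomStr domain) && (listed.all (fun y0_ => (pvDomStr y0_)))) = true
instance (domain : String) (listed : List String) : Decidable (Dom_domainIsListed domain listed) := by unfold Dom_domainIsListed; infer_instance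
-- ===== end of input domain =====

-- B replaces A's per-entry scan (equality + endswith per listed item) by one set of
-- normalized entries plus lookups of the domain and its dot-suffixes (objective: alternative decomposition, same measured cost).


-- shared helper of both Pythons: str(value or "").strip().lower()
-- ('value or ""' is value itself for a nonempty string and "" otherwise, which
--  strips/lowers to "" either way, so strip-then-lower is exact)
def normalizeDomain (value : String) : String :=
  PySem.Str.lower (PySem.Str.strip value)

-- ===== PORT A =====
-- the 'for item in listed' loop with its 'continue' / 'return True' exits;
-- d.endswith("." + item) is checked on the character lists ('.' :: item.toList
-- is exactly ("." + item).toList), via PySem.Chars.endswith (= Str.endswith)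
def loopA (d : String) : List String → Bool
  | [] => false
  | x :: xs =>
    let item := normalizeDomain x
    if item = "" then loopA d xs
    else if d = item ∨ PySem.Chars.endswith d.toList ('.' :: item.toList) = true then true
    else loopA d xs

def domainIsListed (domain : String) (listed : List String) : Bool :=
  let d := normalizeDomain domain
  if d = "" then false
  else loopA d listed

-- ===== PORT B =====
-- Source B's first loop: s = set of nonempty normalized entries
def buildS (listed : List String) : PySem.Set String :=
  listed.foldl (fun acc x =>
    let n := normalizeDomain x
    if n = "" then acc else PySem.Set.add acc n) PySem.Set.empty

def domainIsListed_alt (domain : String) (listed : List String) : Bool :=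
  let s := buildS listed
  let d := normalizeDomain domain
  if d = "" then false
  else if PySem.Set.contains s d then true
  else (PySem.List.enumerate d.toList).any (fun p =>
    p.2 == '.' && PySem.Set.contains s (PySem.Str.slice d (some (p.1 + 1)) none))

-- ===== PRECONDITION & SPEC =====
def Spec_domainIsListed (domain : String) (listed : List String) (out : Bool) : Prop := out = domainIsListed_alt domain listed
instance (domain : String) (listed : List String) (out : Bool) : Decidable (Spec_domainIsListed domain listed out) := by unfold Spec_domainIsListed; infer_instance

-- ===== CLAIM (what is proved, stated in full; the proofs are below) =====
def Claim_equal_domainIsListed : Prop := ∀ (domain : String) (listed : List String), Dom_domainIsListed domain listed → Spec_domainIsListed domain listed (domainIsListed domain listed)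

-- ===== LEMMAS AND PROOFS =====

-- membership in B's set: exactly the nonempty normalized entries of listed
theorem mem_buildS_aux (listed : List String) (acc : PySem.Set String) (y : String) :
    y ∈ listed.foldl (fun acc x =>
      let n := normalizeDomain x
      if n = "" then acc else PySem.Set.add acc n) acc ↔
    y ∈ acc ∨ ∃ x ∈ listed, normalizeDomain x = y ∧ y ≠ "" := by
  induction listed generalizing acc with
  | nil => simp
  | cons x xs ih =>
    simp only [List.foldl_cons, ih]
    by_cases h : normalizeDomain x = ""
    · simp only [h, if_pos trivial]
      constructor
      · rintro (h1 | h1)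
        · exact Or.inl h1
        · exact Or.inr (by simpa using Or.inr h1)
      · rintro (h1 | ⟨z, hz, hn, hy⟩)
        · exact Or.inl h1
        · rcases List.mem_cons.mp hz with rfl | hz
          · exact absurd (hn.symm.trans h) hy
          · exact Or.inr ⟨z, hz, hn, hy⟩
    · simp only [if_neg h, PySem.Set.mem_add]
      constructor
      · rintro ((h1 | rfl) | h1)
        · exact Or.inl h1
        · exact Or.inr ⟨x, List.mem_cons_self .., rfl, h⟩
        · rcases h1 with ⟨z, hz, hn, hy⟩
          exact Or.inr ⟨z, List.mem_cons_of_mem _ hz, hn, hy⟩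
      · rintro (h1 | ⟨z, hz, hn, hy⟩)
        · exact Or.inl (Or.inl h1)
        · rcases List.mem_cons.mp hz with rfl | hz
          · exact Or.inl (Or.inr hn.symm)
          · exact Or.inr ⟨z, hz, hn, hy⟩

theorem mem_buildS (listed : List String) (y : String) :
    y ∈ buildS listed ↔ ∃ x ∈ listed, normalizeDomain x = y ∧ y ≠ "" := by
  unfold buildS
  rw [mem_buildS_aux]
  simp [PySem.Set.empty]

-- A's loop returns true iff some entry matches
theorem loopA_iff (d : String) (listed : List String) :
    loopA d listed = true ↔ ∃ x ∈ listed, normalizeDomain x ≠ "" ∧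
      (d = normalizeDomain x ∨ ('.' :: (normalizeDomain x).toList) <:+ d.toList) := by
  induction listed with
  | nil => simp [loopA]
  | cons x xs ih =>
    simp only [loopA]
    by_cases h : normalizeDomain x = ""
    · simp only [if_pos h, ih]
      constructor
      · rintro ⟨z, hz, hn, hc⟩; exact ⟨z, List.mem_cons_of_mem _ hz, hn, hc⟩
      · rintro ⟨z, hz, hn, hc⟩
        rcases List.mem_cons.mp hz with rfl | hz
        · exact absurd h hn
        · exact ⟨z, hz, hn, hc⟩
    · simp only [if_neg h]
      by_cases hc : d = normalizeDomain x ∨ PySem.Chars.endswith d.toList ('.' :: (normalizeDomain x).toList) = true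
      · simp only [if_pos hc, true_iff]
        refine ⟨x, List.mem_cons_self .., h, ?_⟩
        rcases hc with hc | hc
        · exact Or.inl hc
        · exact Or.inr ((PySem.Chars.endswith_iff _ _).mp hc)
      · simp only [if_neg hc, ih]
        constructor
        · rintro ⟨z, hz, hn, hco⟩; exact ⟨z, List.mem_cons_of_mem _ hz, hn, hco⟩
        · rintro ⟨z, hz, hn, hco⟩
          rcases List.mem_cons.mp hz with rfl | hz
          · exact absurd (by
              rcases hco with hco | hco
              · exact Or.inl hco
              · exact Or.inr ((PySem.Chars.endswith_iff _ _).mpr hco)) hc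
          · exact ⟨z, hz, hn, hco⟩

-- '.'::e is a suffix of l iff e is the part after some '.' in l
theorem dot_suffix_iff (l e : List Char) :
    ('.' :: e) <:+ l ↔ ∃ i : Nat, i < l.length ∧ l[i]? = some '.' ∧ l.drop (i + 1) = e := by
  constructor
  · rintro ⟨t, rfl⟩
    refine ⟨t.length, by simp, ?_, ?_⟩
    · rw [List.getElem?_append_right le_rfl]; simp
    · have : t.length + 1 = t.length + 1 := rfl
      rw [show t.length + 1 = t.length + 1 from rfl, List.drop_append]
      simp
  · rintro ⟨i, hi, hget, hdrop⟩
    refine ⟨l.take i, ?_⟩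
    have h1 : l.drop i = l[i] :: l.drop (i + 1) := List.drop_eq_getElem_cons hi
    have h2 : l[i] = '.' := by
      have := List.getElem?_eq_getElem hi
      rw [this] at hget; exact Option.some.inj hget
    rw [h2, hdrop] at h1
    calc l.take i ++ '.' :: e = l.take i ++ l.drop i := by rw [h1]
      _ = l := List.take_append_drop i l

-- B's enumerate-loop returns true iff some dot-suffix of d lies in s
theorem any_enum_iff (d : String) (s : PySem.Set String) [LawfulBEq String] :
    ((PySem.List.enumerate d.toList).any (fun p =>
      p.2 == '.' && PySem.Set.contains s (PySem.Str.slice d (some (p.1 + 1)) none)) = true) ↔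
    ∃ i : Nat, i < d.toList.length ∧ d.toList[i]? = some '.' ∧
      String.ofList (d.toList.drop (i + 1)) ∈ s := by
  rw [List.any_eq_true]
  constructor
  · rintro ⟨p, hp, hcond⟩
    rcases (PySem.List.mem_enumerate_iff _ _ _).mp hp with ⟨k, hk, rfl⟩
    simp only [Bool.and_eq_true, beq_iff_eq] at hcond
    refine ⟨k, hk, by rw [List.getElem?_eq_getElem hk]; exact congrArg some hcond.1, ?_⟩
    have hsl : PySem.Str.slice d (some ((0 : Int) + k + 1)) none = String.ofList (d.toList.drop (k + 1)) := by
      apply String.toList_inj.mp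
      rw [PySem.Str.toList_slice, PySem.Chars.slice_eq_listSlice]
      rw [show (0 : Int) + k + 1 = ((k + 1 : Nat) : Int) by push_cast; ring]
      rw [PySem.List.slice_from_natCast]
      simp
    rw [hsl] at hcond
    exact (PySem.Set.contains_iff _ _).mp hcond.2
  · rintro ⟨i, hi, hget, hmem⟩
    have hgi : d.toList[i] = '.' := by
      have := List.getElem?_eq_getElem hi
      rw [this] at hget; exact Option.some.inj hget
    refine ⟨((0 : Int) + i, d.toList[i]), (PySem.List.mem_enumerate_iff _ _ _).mpr ⟨i, hi, rfl⟩, ?_⟩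
    simp only [Bool.and_eq_true, beq_iff_eq]
    refine ⟨hgi, ?_⟩
    have hsl : PySem.Str.slice d (some ((0 : Int) + i + 1)) none = String.ofList (d.toList.drop (i + 1)) := by
      apply String.toList_inj.mp
      rw [PySem.Str.toList_slice, PySem.Chars.slice_eq_listSlice]
      rw [show (0 : Int) + i + 1 = ((i + 1 : Nat) : Int) by push_cast; ring]
      rw [PySem.List.slice_from_natCast]
      simp
    rw [hsl]
    exact (PySem.Set.contains_iff _ _).mpr hmem

-- ===== VERDICT (by name: the statement is the Claim_ definition above) =====
theorem domainIsListed_spec : Claim_equal_domainIsListed := by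
  unfold Claim_equal_domainIsListed
  intro domain listed _
  unfold Spec_domainIsListed domainIsListed domainIsListed_alt
  by_cases hd : normalizeDomain domain = ""
  · simp [hd]
  · simp only [if_neg hd]
    set d := normalizeDomain domain with hdef
    set s := buildS listed with hsdef
    by_cases hds : PySem.Set.contains s d = true
    · rw [if_pos hds]
      rw [loopA_iff]
      rcases (mem_buildS listed d).mp ((PySem.Set.contains_iff _ _).mp hds) with ⟨x, hx, hn, _⟩
      exact ⟨x, hx, by rw [hn]; exact hd, Or.inl hn.symm⟩
    · rw [if_neg hds]
      rw [Bool.eq_iff_iff, loopA_iff, any_enum_iff]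
      constructor
      · rintro ⟨x, hx, hn, hc⟩
        rcases hc with hc | hc
        · exact absurd ((PySem.Set.contains_iff _ _).mpr
            ((mem_buildS listed d).mpr ⟨x, hx, hc.symm, hd⟩)) hds
        · rcases (dot_suffix_iff _ _).mp hc with ⟨i, hi, hget, hdrop⟩
          refine ⟨i, hi, hget, ?_⟩
          rw [hdrop]
          have : String.ofList (normalizeDomain x).toList = normalizeDomain x := by
            apply String.toList_inj.mp; simp
          rw [this]
          exact (mem_buildS listed _).mpr ⟨x, hx, rfl, hn⟩
      · rintro ⟨i, hi, hget, hmem⟩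
        rcases (mem_buildS listed _).mp hmem with ⟨x, hx, hn, hne⟩
        refine ⟨x, hx, by rw [hn]; exact fun h => hne (by rw [h]), Or.inr ?_⟩
        rw [hn]
        apply (dot_suffix_iff _ _).mpr
        refine ⟨i, hi, hget, ?_⟩
        have : (String.ofList (d.toList.drop (i + 1))).toList = d.toList.drop (i + 1) := by
          simp
        rw [← this]
        simp
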